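-- pv_equiv track=rewrite | github.com/Gaoyang0/MOS | utils/global_utils.py | get_permission_val
-- ===== SOURCE A (Python) =====
-- def get_permission_val(permission_list):
--     res = 0
--     for item in permission_list:
--         if item == '1':
--             res += 4
--         elif item == '2':
--             res += 2
--         elif item == '3':
--             res += 1
--         else:
--             pass
--     return res
-- ===== SOURCE B (Python) =====
-- def get_permission_val(permission_list):
--     return (4 * permission_list.count('1')
--             + 2 * permission_list.count('2')
--             + permission_list.count('3'))
-- ===== Notes on version B (the rewrite author's own statement) =====
-- stated objective: simpler
-- what changed: Replaces the single branching accumulator loop with a closed weighted-sum formula over three list.count scans (4*count('1') + 2*count('2') + count('3')).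
import Mathlib
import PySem

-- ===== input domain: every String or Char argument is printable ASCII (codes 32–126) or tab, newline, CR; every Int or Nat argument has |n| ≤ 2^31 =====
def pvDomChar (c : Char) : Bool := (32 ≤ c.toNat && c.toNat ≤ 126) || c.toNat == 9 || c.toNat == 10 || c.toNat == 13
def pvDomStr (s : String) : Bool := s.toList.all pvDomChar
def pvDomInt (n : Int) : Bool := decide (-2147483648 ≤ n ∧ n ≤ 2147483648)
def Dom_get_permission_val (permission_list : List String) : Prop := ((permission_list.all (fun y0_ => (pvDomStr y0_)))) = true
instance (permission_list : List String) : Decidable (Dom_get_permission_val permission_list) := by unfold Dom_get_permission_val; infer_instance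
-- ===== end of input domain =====

-- B replaces A's branching accumulator loop with a closed weighted sum of three counts; objective: simpler.

-- ===== PORT A =====
def get_permission_val (permission_list : List String) : Int :=
  permission_list.foldl
    (fun res item =>
      if item == "1" then res + 4
      else if item == "2" then res + 2
      else if item == "3" then res + 1
      else res) 0

-- ===== PORT B =====
def get_permission_val_alt (permission_list : List String) : Int :=
  4 * (PySem.List.count permission_list "1" : Int)
    + 2 * (PySem.List.count permission_list "2" : Int)
    + (PySem.List.count permission_list "3" : Int)

-- ===== PRECONDITION & SPEC =====
def Spec_get_permission_val (permission_list : List String) (out : Int) : Prop := out = get_permission_val_alt permission_list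
instance (permission_list : List String) (out : Int) : Decidable (Spec_get_permission_val permission_list out) := by unfold Spec_get_permission_val; infer_instance

-- ===== CLAIM (what is proved, stated in full; the proofs are below) =====
def Claim_equal_get_permission_val : Prop := ∀ (permission_list : List String), Dom_get_permission_val permission_list → Spec_get_permission_val permission_list (get_permission_val permission_list)

-- ===== LEMMAS AND PROOFS =====
theorem get_permission_val_fold (l : List String) (a : Int) :
    l.foldl
      (fun res item =>
        if item == "1" then res + 4
        else if item == "2" then res + 2
        else if item == "3" then res + 1
        else res) a
    = a + 4 * (l.count "1" : Int) + 2 * (l.count "2" : Int) + (l.count "3" : Int) := by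
  induction l generalizing a with
  | nil => simp
  | cons h t ih =>
    simp only [List.foldl_cons, ih, List.count_cons]
    by_cases h1 : h = "1" <;> by_cases h2 : h = "2" <;> by_cases h3 : h = "3" <;>
      simp_all  <;> ring

-- ===== VERDICT (by name: the statement is the Claim_ definition above) =====
theorem get_permission_val_spec : Claim_equal_get_permission_val := by
  intro l _
  unfold Spec_get_permission_val get_permission_val get_permission_val_alt
  rw [get_permission_val_fold]
  simp [PySem.List.count_eq]
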